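-- pv_equiv track=rewrite | github.com/neolim/visaTask | Schedule.py | routes
-- ===== SOURCE A (Python) =====
-- def routes(numArrivals, numBuses, busCapacity, startPoint):
--
--     # If number of buses smaller than number of stops, then exit from recursion and go back in backtracking
--     if len(startPoint) > numBuses:
--         return []
--
--     # Get last stop from route array
--     lastElem = startPoint[-1]
--
--     # Accumulate possible routs result if number of people in arrivals array equal to last stop index and exit from
--     # recursion
--     if numArrivals == lastElem:
--         return [startPoint]
--
--     # Backtracking from last stop by number of ways of busCapacity
--     routsResult = []
--     for i in range(lastElem + 1, lastElem + busCapacity + 1):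
--         if i > numArrivals:
--             continue
--         temp = startPoint + [i]
--         routsResult += routes(numArrivals, numBuses, busCapacity, temp)
--     return routsResult
-- ===== SOURCE B (Python) =====
-- def routes(numArrivals, numBuses, busCapacity, startPoint):
--     # Different decomposition: recurse only on (lastStop, remaining slots) to build
--     # extension suffixes, then prefix startPoint once at the end.
--     def ext(last, slots):
--         if slots < 0:
--             return []
--         if last == numArrivals:
--             return [[]]
--         res = []
--         for i in range(last + 1, min(last + busCapacity, numArrivals) + 1):
--             for e in ext(i, slots - 1):
--                 res.append([i] + e)
--         return res
--
--     last = startPoint[-1]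
--     return [startPoint + e for e in ext(last, numBuses - len(startPoint))]
-- ===== Notes on version B (the rewrite author's own statement) =====
-- stated objective: alternative
-- what changed: Instead of backtracking that carries the whole growing path and re-applies the length/arrival guards on it at every call, B recurses only on (last stop, remaining bus slots) to enumerate extension suffixes with the candidate range capped by min, and prefixes startPoint once at the end.
-- outside the precondition, e.g. on routes(1, -1, -3, []): A returns [], B raises IndexError
import Mathlib
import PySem

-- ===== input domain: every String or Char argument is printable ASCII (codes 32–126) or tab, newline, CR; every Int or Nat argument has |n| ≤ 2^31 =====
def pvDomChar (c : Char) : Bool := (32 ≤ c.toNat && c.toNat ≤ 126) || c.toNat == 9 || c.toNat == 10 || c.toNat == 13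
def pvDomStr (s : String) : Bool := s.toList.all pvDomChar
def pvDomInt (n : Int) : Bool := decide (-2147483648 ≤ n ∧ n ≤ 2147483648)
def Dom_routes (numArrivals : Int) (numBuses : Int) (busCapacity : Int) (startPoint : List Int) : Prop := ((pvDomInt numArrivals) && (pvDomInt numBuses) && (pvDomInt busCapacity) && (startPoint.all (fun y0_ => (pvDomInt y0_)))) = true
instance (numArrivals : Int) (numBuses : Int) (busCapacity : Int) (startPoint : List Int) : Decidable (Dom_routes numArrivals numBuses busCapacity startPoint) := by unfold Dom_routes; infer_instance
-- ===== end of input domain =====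

-- B rewrites the backtracking as a recursion on (lastStop, remaining slots) building
-- extension suffixes, prefixing startPoint once at the end (objective: alternative).

-- ===== PORT A =====
def routes (numArrivals : Int) (numBuses : Int) (busCapacity : Int) (startPoint : List Int) : List (List Int) :=
  if _h : (startPoint.length : Int) > numBuses then []
  else
    match PySem.List.pyGet? startPoint (-1) with
    | none => []   -- Python raises IndexError here (empty startPoint); excluded by Pre_routes
    | some lastElem =>
      if numArrivals == lastElem then [startPoint]
      else
        (PySem.List.pyRange (lastElem + 1) (lastElem + busCapacity + 1) 1).foldl
          (fun routsResult i =>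
            if i > numArrivals then routsResult
            else routsResult ++ routes numArrivals numBuses busCapacity (startPoint ++ [i])) []
termination_by (numBuses + 1 - (startPoint.length : Int)).toNat
decreasing_by simp; omega

-- ===== PORT B =====
def extB (numArrivals busCapacity : Int) (last slots : Int) : List (List Int) :=
  if _h : slots < 0 then []
  else if last == numArrivals then [[]]
  else
    (PySem.List.pyRange (last + 1) (min (last + busCapacity) numArrivals + 1) 1).foldl
      (fun res i => res ++ (extB numArrivals busCapacity i (slots - 1)).map (fun e => i :: e)) []
termination_by (slots + 1).toNat
decreasing_by omega

def routes_alt (numArrivals : Int) (numBuses : Int) (busCapacity : Int) (startPoint : List Int) : List (List Int) :=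
  match PySem.List.pyGet? startPoint (-1) with
  | none => []   -- Python raises IndexError here; excluded by Pre_routes
  | some last =>
    (extB numArrivals busCapacity last (numBuses - startPoint.length)).map (fun e => startPoint ++ e)

-- ===== PRECONDITION & SPEC =====
-- Pre_ excludes empty startPoint: there A raises IndexError unless numBuses < 0 (where its length guard
-- returns [] before indexing), while B always indexes startPoint[-1] first and raises.
def Pre_routes (numArrivals : Int) (numBuses : Int) (busCapacity : Int) (startPoint : List Int) : Prop := startPoint ≠ []
instance (numArrivals : Int) (numBuses : Int) (busCapacity : Int) (startPoint : List Int) : Decidable (Pre_routes numArrivals numBuses busCapacity startPoint) := by unfold Pre_routes; infer_instance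
def pvWitness_routes : Int × Int × Int × List Int := (4, 3, 2, [0])
def Spec_routes (numArrivals : Int) (numBuses : Int) (busCapacity : Int) (startPoint : List Int) (out : List (List Int)) : Prop := out = routes_alt numArrivals numBuses busCapacity startPoint
instance (numArrivals : Int) (numBuses : Int) (busCapacity : Int) (startPoint : List Int) (out : List (List Int)) : Decidable (Spec_routes numArrivals numBuses busCapacity startPoint out) := by unfold Spec_routes; infer_instance

-- ===== CLAIM (what is proved, stated in full; the proofs are below) =====
def Claim_equal_routes : Prop := ∀ (numArrivals : Int) (numBuses : Int) (busCapacity : Int) (startPoint : List Int), Dom_routes numArrivals numBuses busCapacity startPoint → Pre_routes numArrivals numBuses busCapacity startPoint → Spec_routes numArrivals numBuses busCapacity startPoint (routes numArrivals numBuses busCapacity startPoint)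

-- ===== LEMMAS AND PROOFS =====

theorem pv_foldl_if_flat (n : Int) (f : Int → List (List Int)) :
    ∀ (l : List Int) (init : List (List Int)),
      l.foldl (fun acc i => if i > n then acc else acc ++ f i) init
        = init ++ (l.filter (fun i => decide (i ≤ n))).flatMap f := by
  intro l
  induction l with
  | nil => intro init; simp
  | cons a t ih =>
    intro init
    by_cases h : a > n
    · simp [List.foldl_cons, h, ih, not_le.mpr h]
    · simp [List.foldl_cons, h, ih, not_lt.mp h, List.append_assoc]

theorem pv_foldl_flat (f : Int → List (List Int)) :
    ∀ (l : List Int) (init : List (List Int)),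
      l.foldl (fun acc i => acc ++ f i) init = init ++ l.flatMap f := by
  intro l
  induction l with
  | nil => intro init; simp
  | cons a t ih => intro init; simp [List.foldl_cons, ih, List.append_assoc]

theorem pv_filter_range (n : Int) :
    ∀ (k : Nat) (a b : Int), (b - a).toNat ≤ k →
      (PySem.List.pyRange a b 1).filter (fun i => decide (i ≤ n))
        = PySem.List.pyRange a (min b (n + 1)) 1 := by
  intro k
  induction k with
  | zero =>
    intro a b hk
    rw [PySem.List.pyRange_one_eq_nil (by omega), PySem.List.pyRange_one_eq_nil (by omega)]
    simp
  | succ k ih =>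
    intro a b hk
    by_cases hab : a < b
    · rw [PySem.List.pyRange_one_cons hab]
      by_cases han : a ≤ n
      · rw [List.filter_cons_of_pos (by simpa), ih (a + 1) b (by omega)]
        exact (PySem.List.pyRange_one_cons (show a < min b (n + 1) by omega)).symm
      · rw [List.filter_cons_of_neg (by simpa using han), ih (a + 1) b (by omega),
          PySem.List.pyRange_one_eq_nil (by omega), PySem.List.pyRange_one_eq_nil (by omega)]
    · rw [PySem.List.pyRange_one_eq_nil (by omega), PySem.List.pyRange_one_eq_nil (by omega)]
      simp

theorem pv_main (n c : Int) :
    ∀ (k : Nat) (m : Int) (sp : List Int) (last : Int),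
      (m + 1 - (sp.length : Int)).toNat ≤ k →
      PySem.List.pyGet? sp (-1) = some last →
      routes n m c sp = (extB n c last (m - sp.length)).map (fun e => sp ++ e) := by
  intro k
  induction k with
  | zero =>
    intro m sp last hk hg
    have hlen : (sp.length : Int) > m := by omega
    rw [routes]
    simp only [hlen, dite_true]
    rw [extB]
    simp only [show m - (sp.length : Int) < 0 by omega, dite_true]
    simp
  | succ k ih =>
    intro m sp last hk hg
    rw [routes]
    by_cases hlen : (sp.length : Int) > m
    · simp only [hlen, dite_true]
      rw [extB]
      simp only [show m - (sp.length : Int) < 0 by omega, dite_true]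
      simp
    · simp only [hlen, dite_false, hg]
      rw [extB]
      simp only [show ¬ (m - (sp.length : Int) < 0) by omega, dite_false]
      by_cases heq : n = last
      · simp [heq]
      · simp only [show (n == last) = false by simpa using heq,
          show (last == n) = false by simpa using (Ne.symm heq), Bool.false_eq_true,
          if_false]
        rw [pv_foldl_if_flat, pv_foldl_flat, List.nil_append, List.nil_append,
          pv_filter_range n ((last + c + 1) - (last + 1)).toNat (last + 1) (last + c + 1) le_rfl]
        have hmin : min (last + c + 1) (n + 1) = min (last + c) n + 1 := by omega
        rw [hmin, List.map_flatMap]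
        apply List.flatMap_congr
        intro i _hi
        have hg' : PySem.List.pyGet? (sp ++ [i]) (-1) = some i :=
          PySem.List.pyGet?_neg_one_append_singleton sp i
        rw [ih m (sp ++ [i]) i (by simp; omega) hg']
        have hsl : m - ((sp ++ [i]).length : Int) = m - (sp.length : Int) - 1 := by
          simp; omega
        rw [hsl, List.map_map]
        apply List.map_congr_left
        intro e _he
        simp

-- ===== VERDICT (by name: the statement is the Claim_ definition above) =====
theorem routes_spec : Claim_equal_routes := by
  intro n m c sp _hdom hpre
  unfold Spec_routes routes_alt
  cases hg : PySem.List.pyGet? sp (-1) with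
  | none =>
    rw [PySem.List.pyGet?_neg_one] at hg
    exact absurd (List.getLast?_eq_none_iff.mp hg) hpre
  | some last =>
    exact pv_main n c (m + 1 - (sp.length : Int)).toNat m sp last le_rfl hg
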